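-- pv_equiv track=rewrite | github.com/JamesDev51/algorithm | 프로그래머스 (Programmers)/Level_1/기사단원의 무기.py | solution
-- ===== SOURCE A (Python) =====
-- def solution(number, limit, power):
--     answer = 0
--     d=[1]*100001
--     for i in range(2,100001):
--         for j in range(i,100001,i):d[j]+=1
--
--     for num in range(1,number+1):
--         if d[num]>limit:answer+=power
--         else:answer+=d[num]
--
--
--     return answer
-- ===== SOURCE B (Python) =====
-- def solution(number, limit, power):
--     answer = 0
--     for num in range(1, number + 1):
--         cnt = 0
--         i = 1
--         while i * i <= num:
--             if num % i == 0:
--                 cnt += 1 if i * i == num else 2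
--             i += 1
--         answer += power if cnt > limit else cnt
--     return answer
-- ===== Notes on version B (the rewrite author's own statement) =====
-- stated objective: simpler
-- what changed: B drops A's hardcoded 100001-entry global divisor sieve and instead counts each number's divisors independently by trial division up to the square root (pairing divisor i with num//i), then applies the same cap.
import Mathlib
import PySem

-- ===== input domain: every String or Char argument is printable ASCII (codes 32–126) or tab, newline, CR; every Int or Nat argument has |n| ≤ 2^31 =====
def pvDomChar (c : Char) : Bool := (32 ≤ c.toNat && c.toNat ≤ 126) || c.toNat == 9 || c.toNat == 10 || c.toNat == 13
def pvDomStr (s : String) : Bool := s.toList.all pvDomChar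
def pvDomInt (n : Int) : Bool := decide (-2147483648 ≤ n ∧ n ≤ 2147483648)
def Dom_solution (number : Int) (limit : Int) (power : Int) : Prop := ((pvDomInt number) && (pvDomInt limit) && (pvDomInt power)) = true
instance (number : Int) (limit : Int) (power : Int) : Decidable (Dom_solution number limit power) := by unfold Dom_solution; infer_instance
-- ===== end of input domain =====

-- B replaces A's fixed 100001-entry divisor sieve by an independent per-number
-- trial division up to the square root (objective: simpler, no hardcoded table).

-- ===== PORT A =====
-- A-side helper: the divisor-count table d built by A's two sieve loops
-- ('d=[1]*100001; for i in range(2,100001): for j in range(i,100001,i): d[j]+=1').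
-- Python's list is ported as Array Int; indices j are ≥ 2 so 'j.toNat' is exact.
def pvSieve : Array Int :=
  (PySem.List.pyRange 2 100001 1).foldl
    (fun d i => (PySem.List.pyRange i 100001 i).foldl
      (fun d j => d.set! j.toNat (d[j.toNat]! + 1)) d)
    (Array.replicate 100001 1)

def solution (number : Int) (limit : Int) (power : Int) : Int :=
  let d := pvSieve
  -- 'for num in range(1,number+1): …'; num ≥ 1 so 'num.toNat' is exact
  (PySem.List.pyRange 1 (number + 1) 1).foldl
    (fun answer num =>
      if d[num.toNat]! > limit then answer + power else answer + d[num.toNat]!)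
    0

-- ===== PORT B =====
-- B-side helper: the 'while i*i <= num' trial-division loop of Source B.
def countDivAux (num : Int) (i : Int) (cnt : Int) : Int :=
  if h : i * i ≤ num then
    countDivAux num (i + 1)
      (if PySem.Int.mod num i = 0 then (if i * i = num then cnt + 1 else cnt + 2) else cnt)
  else cnt
termination_by (num + 1 - i).toNat
decreasing_by
  have hi : i ≤ num := by nlinarith [mul_self_nonneg (i - 1), mul_self_nonneg i]
  omega

def solution_alt (number : Int) (limit : Int) (power : Int) : Int :=
  (PySem.List.pyRange 1 (number + 1) 1).foldl
    (fun answer num =>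
      let cnt := countDivAux num 1 0
      answer + (if cnt > limit then power else cnt))
    0

-- ===== PRECONDITION & SPEC =====
-- A indexes the fixed table d[0..100000] at every num ≤ number, so for
-- number ≥ 100001 the Python A raises IndexError; Pre_ excludes exactly that.
def Pre_solution (number : Int) (limit : Int) (power : Int) : Prop := number ≤ 100000
instance (number : Int) (limit : Int) (power : Int) : Decidable (Pre_solution number limit power) := by unfold Pre_solution; infer_instance
def pvWitness_solution : Int × Int × Int := (12, 3, 7)

def Spec_solution (number : Int) (limit : Int) (power : Int) (out : Int) : Prop := out = solution_alt number limit power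
instance (number : Int) (limit : Int) (power : Int) (out : Int) : Decidable (Spec_solution number limit power out) := by unfold Spec_solution; infer_instance

-- ===== CLAIM (what is proved, stated in full; the proofs are below) =====
def Claim_equal_solution : Prop := ∀ (number : Int) (limit : Int) (power : Int), Dom_solution number limit power → Pre_solution number limit power → Spec_solution number limit power (solution number limit power)

-- ===== LEMMAS AND PROOFS =====

-- the increment step of A's sieve, as a named function for the lemmas below
def pvIncr (d : Array Int) (j : Int) : Array Int := d.set! j.toNat (d[j.toNat]! + 1)

theorem getbang_set (xs : Array Int) (i : Nat) (v : Int) (k : Nat) (h : i < xs.size) :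
    (xs.set! i v)[k]! = if k = i then v else xs[k]! := by
  simp only [Array.set!, Array.getElem!_eq_getD, Array.getD_eq_getD_getElem?,
    Array.getElem?_setIfInBounds, h, if_true]
  by_cases hk : k = i
  · simp [hk]
  · rw [if_neg (fun hh => hk hh.symm), if_neg hk]

theorem get_foldl_incr (L : List Int) (d : Array Int) (k : Nat) (hk : k < d.size)
    (hL : ∀ j ∈ L, 0 ≤ j ∧ j.toNat < d.size) :
    (L.foldl pvIncr d)[k]! = d[k]! + (L.countP (fun j => j.toNat = k) : Int) := by
  induction L generalizing d with
  | nil => simp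
  | cons j L ih =>
      have hj := hL j (List.mem_cons_self ..)
      have hsz : (pvIncr d j).size = d.size := by simp [pvIncr, Array.set!]
      rw [List.foldl_cons, ih (pvIncr d j) (by omega)
        (fun x hx => by have := hL x (List.mem_cons_of_mem _ hx); omega)]
      have hg : (pvIncr d j)[k]! = if k = j.toNat then d[j.toNat]! + 1 else d[k]! :=
        getbang_set d j.toNat (d[j.toNat]! + 1) k (by omega)
      rw [List.countP_cons, hg]
      by_cases hjk : j.toNat = k
      · rw [if_pos hjk.symm, hjk, if_pos (by simp)]
        push_cast; ring
      · rw [if_neg (fun hh => hjk hh.symm), if_neg (by simpa using hjk)]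
        push_cast; ring

-- the flattened list of all sieve updates
def pvFlat : List Int :=
  (PySem.List.pyRange 2 100001 1).flatMap (fun i => PySem.List.pyRange i 100001 i)

theorem pvSieve_eq_flat :
    pvSieve = pvFlat.foldl pvIncr (Array.replicate 100001 1) := by
  rw [pvFlat, List.foldl_flatMap]; rfl

theorem pvSieve_get (k : Nat) (hk1 : 1 ≤ k) (hk : k ≤ 100000) :
    pvSieve[k]! = ((Nat.divisors k).card : Int) := by
  have hflat : ∀ j ∈ pvFlat, (2:Int) ≤ j ∧ j < 100001 := by
    intro j hj
    rw [pvFlat, List.mem_flatMap] at hj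
    obtain ⟨i, hi, hji⟩ := hj
    rw [PySem.List.mem_pyRange_one] at hi
    rw [PySem.List.mem_pyRange_iff_of_pos (by omega)] at hji
    omega
  have hsz : (Array.replicate 100001 (1:Int)).size = 100001 := by simp
  rw [pvSieve_eq_flat, get_foldl_incr pvFlat _ k (by omega)
    (fun j hj => by have := hflat j hj; omega)]
  have hinit : (Array.replicate 100001 (1:Int))[k]! = 1 := by
    rw [Array.getElem!_eq_getD, Array.getD_eq_getD_getElem?]
    simp only [Array.getElem?_replicate]
    rw [if_pos (by omega)]
    rfl
  rw [hinit]
  -- countP over the flattened updates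
  have hc1 : pvFlat.countP (fun j => j.toNat = k) = pvFlat.count ((k:Int)) := by
    rw [List.count]
    apply List.countP_congr
    intro j hj
    have := hflat j hj
    constructor <;> intro h
    · simp_all; omega
    · simp_all
  rw [hc1, pvFlat, List.count_flatMap]
  -- inner counts are membership indicators
  have hcnt : ∀ i ∈ PySem.List.pyRange 2 100001 1,
      (List.count ((k:Int)) ∘ fun i => PySem.List.pyRange i 100001 i) i
        = if (i ∣ (k:Int) ∧ i ≤ (k:Int)) then 1 else 0 := by
    intro i hi
    rw [PySem.List.mem_pyRange_one] at hi
    have hnodup : (PySem.List.pyRange i 100001 i).Nodup := by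
      rw [PySem.List.pyRange_of_pos _ _ (by omega)]
      refine List.Nodup.map ?_ (List.nodup_range)
      intro t1 t2 h
      have : (i:Int) * t1 = i * t2 := by linarith
      have := mul_left_cancel₀ (by omega : (i:Int) ≠ 0) this
      exact_mod_cast this
    by_cases hm : (i ∣ (k:Int) ∧ i ≤ (k:Int))
    · rw [if_pos hm]
      apply List.count_eq_one_of_mem hnodup
      rw [PySem.List.mem_pyRange_iff_of_pos (by omega)]
      exact ⟨hm.2, by omega, dvd_sub hm.1 dvd_rfl⟩
    · rw [if_neg hm]
      apply List.count_eq_zero_of_not_mem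
      rw [PySem.List.mem_pyRange_iff_of_pos (by omega)]
      rintro ⟨h1, h2, h3⟩
      refine hm ⟨?_, h1⟩
      have hk' : (k:Int) = (k - i) + i := by ring
      rw [hk']
      exact dvd_add h3 dvd_rfl
  rw [List.map_congr_left hcnt]
  rw [PySem.List.pyRange_one 2 100001, List.map_map]
  have hbridge : ∀ (m : Nat) (g : Nat → Nat),
      ((List.range m).map g).sum = ∑ t ∈ Finset.range m, g t := fun m g => rfl
  rw [hbridge]
  have hcast2 : ∀ t : Nat, (((2:Int) + t) ∣ (k:Int) ∧ ((2:Int) + t) ≤ (k:Int)) ↔ ((t + 2) ∣ k ∧ t + 2 ≤ k) := by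
    intro t
    have he : ((2:Int) + t) = ((t + 2 : Nat) : Int) := by push_cast; ring
    rw [he]
    constructor <;> rintro ⟨h1, h2⟩
    · exact ⟨by exact_mod_cast h1, by exact_mod_cast h2⟩
    · exact ⟨by exact_mod_cast h1, by exact_mod_cast h2⟩
  have hcard : (∑ t ∈ Finset.range (((100001:Int) - 2).toNat),
        ((fun i => if (i ∣ (k:Int) ∧ i ≤ (k:Int)) then 1 else 0) ∘ (fun t : Nat => (2:Int) + t)) t)
      = ((Finset.range 99999).filter (fun t : Nat => (t + 2) ∣ k ∧ t + 2 ≤ k)).card := by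
    rw [Finset.card_filter]
    have h9 : (((100001:Int) - 2).toNat) = 99999 := by omega
    rw [h9]
    apply Finset.sum_congr rfl
    intro t _
    simp only [Function.comp]
    by_cases hq : (t + 2) ∣ k ∧ t + 2 ≤ k
    · rw [if_pos ((hcast2 t).mpr hq), if_pos hq]
    · rw [if_neg (fun hh => hq ((hcast2 t).mp hh)), if_neg hq]
  rw [hcard]
  have hbij : ((Finset.range 99999).filter (fun t : Nat => (t + 2) ∣ k ∧ t + 2 ≤ k)).card
      = ((Nat.divisors k).erase 1).card := by
    refine Finset.card_bij' (fun t _ => t + 2) (fun d _ => d - 2) ?hi ?hj ?li ?ri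
    case li => intro t ht; show t + 2 - 2 = t; omega
    case ri =>
      intro d hd
      rw [Finset.mem_erase, Nat.mem_divisors] at hd
      obtain ⟨hne, hdvd, _⟩ := hd
      have hd1 : 1 ≤ d := Nat.pos_of_dvd_of_pos hdvd (by omega)
      show d - 2 + 2 = d
      omega
    case hi =>
      intro t ht
      show t + 2 ∈ (Nat.divisors k).erase 1
      rw [Finset.mem_filter, Finset.mem_range] at ht
      obtain ⟨_, hdvd, hle⟩ := ht
      rw [Finset.mem_erase, Nat.mem_divisors]
      exact ⟨by omega, hdvd, by omega⟩
    case hj =>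
      intro d hd
      show d - 2 ∈ (Finset.range 99999).filter (fun t : Nat => (t + 2) ∣ k ∧ t + 2 ≤ k)
      rw [Finset.mem_erase, Nat.mem_divisors] at hd
      obtain ⟨hne, hdvd, _⟩ := hd
      have hd1 : 1 ≤ d := Nat.pos_of_dvd_of_pos hdvd (by omega)
      have hdk : d ≤ k := Nat.le_of_dvd (by omega) hdvd
      rw [Finset.mem_filter, Finset.mem_range]
      have hd2 : 2 ≤ d := by omega
      refine ⟨by omega, ?_, by omega⟩
      have he : d - 2 + 2 = d := by omega
      rw [he]
      exact hdvd
  rw [hbij]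
  have h1mem : (1:Nat) ∈ Nat.divisors k := Nat.one_mem_divisors.mpr (by omega)
  have hpos : 1 ≤ (Nat.divisors k).card := Finset.card_pos.mpr ⟨1, h1mem⟩
  rw [Finset.card_erase_of_mem h1mem]
  omega

-- B's loop computes the divisor count, summed from i up to √n
theorem countDivAux_fuel (n : Nat) (fuel : Nat) : ∀ (a : Nat) (cnt : Int), 1 ≤ a →
    Nat.sqrt n + 1 - a ≤ fuel →
    countDivAux (n : Int) (a : Int) cnt =
      cnt + ∑ t ∈ Finset.Icc a (Nat.sqrt n),
        (if t ∣ n then (if t * t = n then (1 : Int) else 2) else 0) := by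
  induction fuel with
  | zero =>
      intro a cnt ha hf
      have hs : Nat.sqrt n < a := by omega
      have hg : ¬ ((a : Int) * (a : Int) ≤ (n : Int)) := by
        intro hh
        have h2 : a * a ≤ n := by exact_mod_cast hh
        have h3 : a ≤ Nat.sqrt n := Nat.le_sqrt.mpr h2
        omega
      rw [countDivAux, dif_neg hg, Finset.Icc_eq_empty_of_lt (by omega), Finset.sum_empty, add_zero]
  | succ fuel ih =>
      intro a cnt ha hf
      by_cases hle : a ≤ Nat.sqrt n
      · have hg : (a : Int) * (a : Int) ≤ (n : Int) := by
          exact_mod_cast Nat.le_sqrt.mp hle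
        rw [countDivAux, dif_pos hg]
        have hcast : ((a : Int) + 1) = ((a + 1 : Nat) : Int) := by push_cast; ring
        rw [hcast, ih (a+1) _ (by omega) (by omega)]
        have hmod : (PySem.Int.mod (n : Int) (a : Int) = 0) ↔ a ∣ n := by
          rw [PySem.Int.mod_eq_zero_iff_dvd]; exact Int.natCast_dvd_natCast
        have hsq : ((a : Int) * (a : Int) = (n : Int)) ↔ a * a = n := by
          constructor <;> intro hh <;> exact_mod_cast hh
        have hins : Finset.Icc a (Nat.sqrt n) = insert a (Finset.Icc (a+1) (Nat.sqrt n)) := by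
          ext x; simp; omega
        rw [hins, Finset.sum_insert (by simp)]
        by_cases hd : a ∣ n
        · by_cases he : a * a = n
          · rw [if_pos (hmod.mpr hd), if_pos (hsq.mpr he), if_pos hd, if_pos he]; ring
          · rw [if_pos (hmod.mpr hd), if_neg (fun hh => he (hsq.mp hh)), if_pos hd, if_neg he]; ring
        · rw [if_neg (fun hh => hd (hmod.mp hh)), if_neg hd]; ring
      · have hg : ¬ ((a : Int) * (a : Int) ≤ (n : Int)) := by
          intro hh
          have h2 : a * a ≤ n := by exact_mod_cast hh
          have h3 : a ≤ Nat.sqrt n := Nat.le_sqrt.mpr h2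
          omega
        rw [countDivAux, dif_neg hg, Finset.Icc_eq_empty_of_lt (by omega), Finset.sum_empty, add_zero]

theorem countDivAux_eq (n : Nat) (a : Nat) (cnt : Int) (ha : 1 ≤ a) :
    countDivAux (n : Int) (a : Int) cnt =
      cnt + ∑ t ∈ Finset.Icc a (Nat.sqrt n),
        (if t ∣ n then (if t * t = n then (1 : Int) else 2) else 0) :=
  countDivAux_fuel n (Nat.sqrt n + 1 - a) a cnt ha le_rfl

-- √-pairing: summing 2 per divisor below √n (1 on √n itself) counts all divisors
theorem sqrt_pairing (n : Nat) (hn : 1 ≤ n) :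
    ∑ t ∈ Finset.Icc 1 (Nat.sqrt n),
        (if t ∣ n then (if t * t = n then (1 : Int) else 2) else 0)
      = ((Nat.divisors n).card : Int) := by
  have hn0 : n ≠ 0 := by omega
  -- small divisors
  have hfilter : (Finset.Icc 1 (Nat.sqrt n)).filter (· ∣ n)
      = (Nat.divisors n).filter (fun d => d * d ≤ n) := by
    ext d
    simp only [Finset.mem_filter, Finset.mem_Icc, Nat.mem_divisors]
    constructor
    · rintro ⟨⟨h1, h2⟩, h3⟩
      exact ⟨⟨h3, hn0⟩, Nat.le_sqrt.mp h2⟩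
    · rintro ⟨⟨h1, _⟩, h2⟩
      have hd0 : 0 < d := Nat.pos_of_dvd_of_pos h1 (by omega)
      exact ⟨⟨hd0, Nat.le_sqrt.mpr h2⟩, h1⟩
  have hsum : ∑ t ∈ Finset.Icc 1 (Nat.sqrt n),
        (if t ∣ n then (if t * t = n then (1 : Int) else 2) else 0)
      = ∑ d ∈ (Nat.divisors n).filter (fun d => d * d ≤ n),
          (if d * d = n then (1 : Int) else 2) := by
    rw [← hfilter, Finset.sum_filter]
  rw [hsum]
  -- split 2 = 1 + 1
  have hsplit : ∑ d ∈ (Nat.divisors n).filter (fun d => d * d ≤ n),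
        (if d * d = n then (1 : Int) else 2)
      = ((Nat.divisors n).filter (fun d => d * d ≤ n)).card
        + ((Nat.divisors n).filter (fun d => d * d < n)).card := by
    have h1 : ∀ d ∈ (Nat.divisors n).filter (fun d => d * d ≤ n),
        (if d * d = n then (1 : Int) else 2) = 1 + (if d * d < n then 1 else 0) := by
      intro d hd
      rw [Finset.mem_filter] at hd
      by_cases he : d * d = n
      · rw [if_pos he, if_neg (by omega)]; norm_num
      · rw [if_neg he, if_pos (by omega)]; norm_num
    rw [Finset.sum_congr rfl h1, Finset.sum_add_distrib]
    congr 1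
    · simp
    · have hff : ((Nat.divisors n).filter (fun d => d * d ≤ n)).filter (fun d => d * d < n)
          = (Nat.divisors n).filter (fun d => d * d < n) := by
        rw [Finset.filter_filter]
        apply Finset.filter_congr
        intro x _
        constructor <;> intro h <;> omega
      rw [← Finset.sum_filter, hff, Finset.sum_const, nsmul_eq_mul, mul_one]
  rw [hsplit]
  -- bijection d ↦ n / d between strict-small and large divisors
  have hbij : ((Nat.divisors n).filter (fun d => d * d < n)).card
      = ((Nat.divisors n).filter (fun d => n < d * d)).card := by
    apply Finset.card_bij' (fun d _ => n / d) (fun e _ => n / e)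
    · intro d hd
      rw [Finset.mem_filter, Nat.mem_divisors] at hd ⊢
      obtain ⟨⟨hdvd, _⟩, hlt⟩ := hd
      have hd0 : 0 < d := Nat.pos_of_dvd_of_pos hdvd (by omega)
      have hmul : d * (n / d) = n := Nat.mul_div_cancel' hdvd
      have hlt2 : d < n / d := by nlinarith
      refine ⟨⟨Nat.div_dvd_of_dvd hdvd, hn0⟩, by nlinarith⟩
    · intro e he
      rw [Finset.mem_filter, Nat.mem_divisors] at he ⊢
      obtain ⟨⟨hdvd, _⟩, hlt⟩ := he
      have he0 : 0 < e := Nat.pos_of_dvd_of_pos hdvd (by omega)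
      have hmul : e * (n / e) = n := Nat.mul_div_cancel' hdvd
      have hlt2 : n / e < e := by nlinarith
      refine ⟨⟨Nat.div_dvd_of_dvd hdvd, hn0⟩, by nlinarith⟩
    · intro d hd
      rw [Finset.mem_filter, Nat.mem_divisors] at hd
      exact Nat.div_div_self hd.1.1 hn0
    · intro e he
      rw [Finset.mem_filter, Nat.mem_divisors] at he
      exact Nat.div_div_self he.1.1 hn0
  rw [hbij]
  -- combine: small + large = all
  have hall : ((Nat.divisors n).filter (fun d => d * d ≤ n)).card
      + ((Nat.divisors n).filter (fun d => n < d * d)).card = (Nat.divisors n).card := by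
    have := Finset.card_filter_add_card_filter_not
      (s := Nat.divisors n) (p := fun d => d * d ≤ n)
    rw [← this]
    congr 2
    apply Finset.filter_congr
    intro x _
    constructor <;> intro h <;> omega
  push_cast [← hall]
  ring

-- ===== VERDICT (by name: the statement is the Claim_ definition above) =====
theorem solution_spec : Claim_equal_solution := by
  intro number limit power _ hpre
  unfold Spec_solution solution solution_alt
  apply PySem.List.foldl_congr_mem
  intro acc num hmem
  rw [PySem.List.mem_pyRange_one] at hmem
  have h1 : 1 ≤ num := hmem.1
  have h2 : num ≤ 100000 := by have := hmem.2; unfold Pre_solution at hpre; omega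
  have hnum : ((num.toNat : Int)) = num := by omega
  have hτ : pvSieve[num.toNat]! = countDivAux num 1 0 := by
    rw [pvSieve_get num.toNat (by omega) (by omega)]
    have hb := countDivAux_eq num.toNat 1 0 le_rfl
    rw [Nat.cast_one, hnum] at hb
    rw [hb, sqrt_pairing num.toNat (by omega)]
    ring
  simp only [hτ]
  split_ifs <;> ring
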